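-- pv_equiv track=rewrite | github.com/GeorgeRodney/Estimators | EstimatorUtils.py | convertToOOSM
-- ===== SOURCE A (Python) =====
-- def move_element(a, i, j):
--     a = list(a)
--     elem = a.pop(i)
--     a.insert(j, elem)
--     return a
--
-- def convertToOOSM(obs):
--     obs_OOSM = list(obs)
--     n = len(obs_OOSM)
--     interval = 5
--
--     for idx in range(0, n, interval):
--         if idx > 0:
--             obs_OOSM = move_element(obs_OOSM, idx, idx - 1)
--     return obs_OOSM
-- ===== SOURCE B (Python) =====
-- def convertToOOSM(obs):
--     n = len(obs)
--     return [obs[i + 1] if i % 5 == 4 and i + 1 < n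
--             else obs[i - 1] if i % 5 == 0 and i > 0
--             else obs[i]
--             for i in range(n)]
-- ===== Notes on version B (the rewrite author's own statement) =====
-- stated objective: faster
-- what changed: Replaces the repeated pop/insert passes (each an O(n) list rebuild) by a single list comprehension applying the closed-form index permutation (positions i%5==4 and the following multiple of 5 are swapped).
import Mathlib
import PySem

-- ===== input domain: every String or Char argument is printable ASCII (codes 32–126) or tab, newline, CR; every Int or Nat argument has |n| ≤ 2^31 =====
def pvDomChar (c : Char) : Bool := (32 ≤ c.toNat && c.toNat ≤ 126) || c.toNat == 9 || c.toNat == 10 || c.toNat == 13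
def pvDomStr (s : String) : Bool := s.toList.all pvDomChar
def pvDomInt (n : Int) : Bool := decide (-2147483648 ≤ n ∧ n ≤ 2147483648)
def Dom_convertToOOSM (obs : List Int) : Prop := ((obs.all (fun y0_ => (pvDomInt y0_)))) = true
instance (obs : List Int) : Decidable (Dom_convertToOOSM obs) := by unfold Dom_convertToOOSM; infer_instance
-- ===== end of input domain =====

-- B replaces A's repeated pop/insert list rebuilds by one comprehension applying the
-- closed-form index permutation; the equivalence is proved below.

-- ===== PORT A =====
-- a = list(a); elem = a.pop(i); a.insert(j, elem); return a
-- (pop? returns none exactly where Python raises IndexError; A only calls it with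
--  0 < i < len(a), so the none arm is never reached)
def move_element (a : List Int) (i j : Int) : List Int :=
  match PySem.List.pop? a i with
  | some (elem, a') => PySem.List.insert a' j elem
  | none => []

def convertToOOSM (obs : List Int) : List Int :=
  (PySem.List.pyRange 0 (obs.length : Int) 5).foldl
    (fun acc idx => if idx > 0 then move_element acc idx (idx - 1) else acc) obs

-- ===== PORT B =====
-- [obs[i+1] if i%5==4 and i+1<n else obs[i-1] if i%5==0 and i>0 else obs[i] for i in range(n)]
-- (the guards keep every index in range, so pyGetD's default is never used)
def convertToOOSM_alt (obs : List Int) : List Int :=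
  let n : Int := obs.length
  (PySem.List.pyRange 0 n 1).map (fun i =>
    if PySem.Int.mod i 5 = 4 ∧ i + 1 < n then PySem.List.pyGetD obs (i + 1) 0
    else if PySem.Int.mod i 5 = 0 ∧ i > 0 then PySem.List.pyGetD obs (i - 1) 0
    else PySem.List.pyGetD obs i 0)

-- ===== PRECONDITION & SPEC =====
def Spec_convertToOOSM (obs : List Int) (out : List Int) : Prop := out = convertToOOSM_alt obs
instance (obs : List Int) (out : List Int) : Decidable (Spec_convertToOOSM obs out) := by unfold Spec_convertToOOSM; infer_instance

-- ===== CLAIM (what is proved, stated in full; the proofs are below) =====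
def Claim_equal_convertToOOSM : Prop := ∀ (obs : List Int), Dom_convertToOOSM obs → Spec_convertToOOSM obs (convertToOOSM obs)

-- ===== LEMMAS AND PROOFS =====

-- Both programs realise the same block recursion: keep 4 elements, emit the 6th,
-- and recurse on the 5th element consed onto the remainder.
def pvBlock : List Int → List Int
  | x0 :: x1 :: x2 :: x3 :: x4 :: x5 :: rest => x0 :: x1 :: x2 :: x3 :: x5 :: pvBlock (x4 :: rest)
  | l => l
termination_by l => l.length
decreasing_by simp

lemma pv_insert_append (p e : List Int) (m : Nat) (v : Int) (hm : m ≤ e.length) :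
    PySem.List.insert (p ++ e) ((p.length + m : Nat) : Int) v = p ++ PySem.List.insert e ((m : Nat) : Int) v := by
  simp [PySem.List.insert, PySem.List.sliceIndices]
  rw [if_neg (by omega), min_eq_left (by exact_mod_cast hm), if_neg (by omega)]
  have h1 : ((p.length : Int) + m).toNat = p.length + m := by omega
  have h2 : ((m : Int)).toNat = m := by omega
  rw [h1, h2, List.take_append, List.drop_append]
  simp [List.take_of_length_le (Nat.le_add_right p.length m), List.drop_of_length_le (Nat.le_add_right p.length m)]

lemma pv_move_shift (p t : List Int) (j : Nat) (hp : p.length = 5) (h1 : 1 ≤ j) (h2 : j < t.length) :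
    move_element (p ++ t) ((5 + j : Nat) : Int) (((5 + j : Nat) : Int) - 1)
      = p ++ move_element t ((j : Nat) : Int) (((j : Nat) : Int) - 1) := by
  have hlt : 5 + j < (p ++ t).length := by simp [hp]; omega
  rw [move_element, move_element, PySem.List.pop?_natCast _ _ hlt, PySem.List.pop?_natCast _ _ h2]
  have hg : (p ++ t)[5 + j]'(hlt) = t[j]'h2 := by
    rw [List.getElem_append_right (by omega)]
    congr 1
    simp [hp]
  have he : (p ++ t).eraseIdx (5 + j) = p ++ t.eraseIdx j := by
    rw [List.eraseIdx_append_of_length_le (by omega)]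
    congr 1
    simp [hp]
  simp only [hg, he]
  have h3 := pv_insert_append p (t.eraseIdx j) (j - 1) (t[j]'h2) (by simp [List.length_eraseIdx, h2]; omega)
  rw [show ((5 + j : Nat) : Int) - 1 = ((p.length + (j - 1) : Nat) : Int) by push_cast [hp]; omega]
  rw [h3]
  congr 2
  omega

lemma pv_len_move (a : List Int) (j : Nat) (hj : j < a.length) :
    (move_element a ((j : Nat) : Int) (((j : Nat) : Int) - 1)).length = a.length := by
  rw [move_element, PySem.List.pop?_natCast _ _ hj]
  rw [PySem.List.length_insert, List.length_eraseIdx]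
  simp [hj]
  omega

lemma pv_len_fold (c : Nat) (f : Nat → Nat) (t : List Int) (hf : ∀ k < c, f k < t.length) :
    ((List.range c).foldl (fun a k => move_element a ((f k : Nat) : Int) (((f k : Nat) : Int) - 1)) t).length
      = t.length := by
  induction c with
  | zero => simp
  | succ c ih =>
    rw [List.range_succ, List.foldl_append]
    simp only [List.foldl_cons, List.foldl_nil]
    rw [pv_len_move _ _ (by rw [ih (fun k hk => hf k (by omega))]; exact hf c (by omega))]
    exact ih (fun k hk => hf k (by omega))

lemma pv_shift (c : Nat) (p t : List Int) (hp : p.length = 5) (hc : 5 * c < t.length) :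
    (List.range c).foldl (fun a k => move_element a ((5 * k + 10 : Nat) : Int) (((5 * k + 10 : Nat) : Int) - 1)) (p ++ t)
      = p ++ (List.range c).foldl (fun a k => move_element a ((5 * k + 5 : Nat) : Int) (((5 * k + 5 : Nat) : Int) - 1)) t := by
  induction c with
  | zero => simp
  | succ c ih =>
    rw [List.range_succ, List.foldl_append, List.foldl_append]
    simp only [List.foldl_cons, List.foldl_nil]
    rw [ih (by omega)]
    have hlen : ((List.range c).foldl (fun a k => move_element a ((5 * k + 5 : Nat) : Int) (((5 * k + 5 : Nat) : Int) - 1)) t).length = t.length :=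
      pv_len_fold c (fun k => 5 * k + 5) t (fun k hk => by show 5 * k + 5 < t.length; omega)
    have h := pv_move_shift p _ (5 * c + 5) hp (by omega) (by rw [hlen]; omega)
    rw [show (5 : Nat) + (5 * c + 5) = 5 * c + 10 by omega] at h
    exact h

lemma pv_swap (x0 x1 x2 x3 x4 x5 : Int) (rest : List Int) :
    move_element (x0 :: x1 :: x2 :: x3 :: x4 :: x5 :: rest) ((5 : Int)) ((5 : Int) - 1)
      = [x0, x1, x2, x3, x5] ++ (x4 :: rest) := by
  rw [move_element]
  rw [show (5 : Int) = ((5 : Nat) : Int) by norm_num]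
  rw [PySem.List.pop?_natCast _ 5 (by simp)]
  simp [List.eraseIdx, PySem.List.insert, PySem.List.sliceIndices]
  rw [min_eq_left (by omega)]
  rw [show Int.toNat 4 = 4 from rfl]
  simp [List.take_succ_cons, List.drop_succ_cons]

-- A's loop, rewritten over `List.range` (pyRange 0 n 5 is the image of range under k ↦ 5k)
def pvLoop (c : Nat) (l : List Int) : List Int :=
  (List.range c).foldl
    (fun a k => if ((5 * k : Nat) : Int) > 0 then move_element a ((5 * k : Nat) : Int) (((5 * k : Nat) : Int) - 1) else a) l

lemma pv_A_as_loop (obs : List Int) :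
    convertToOOSM obs
      = pvLoop (if (0 : Int) < (obs.length : Int) then (((obs.length : Int) + 4) / 5).toNat else 0) obs := by
  rw [convertToOOSM, PySem.List.pyRange_of_pos 0 (obs.length : Int) (by norm_num), List.foldl_map, pvLoop]
  congr 1
  · funext a k
    norm_num
  · split
    · congr 1
      omega
    · rfl

lemma pv_loop_one (l : List Int) : pvLoop 1 l = l := by
  simp [pvLoop, List.range_succ]

lemma pv_small (l : List Int) (h : l.length ≤ 5) : convertToOOSM l = l := by
  rw [pv_A_as_loop]
  by_cases h0 : (0 : Int) < (l.length : Int)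
  · rw [if_pos h0, show (((l.length : Int) + 4) / 5).toNat = 1 by omega, pv_loop_one]
  · rw [if_neg h0]
    rfl

lemma pv_loop_step (x0 x1 x2 x3 x4 x5 : Int) (rest : List Int) (c : Nat)
    (hc : 5 * c < rest.length + 1) :
    pvLoop (c + 2) (x0 :: x1 :: x2 :: x3 :: x4 :: x5 :: rest)
      = x0 :: x1 :: x2 :: x3 :: x5 :: pvLoop (c + 1) (x4 :: rest) := by
  rw [pvLoop, pvLoop]
  rw [show c + 2 = (c + 1) + 1 from rfl, List.range_succ_eq_map, List.range_succ_eq_map]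
  simp only [List.map_cons, List.foldl_cons, List.foldl_map]
  norm_num
  have h0 := pv_swap x0 x1 x2 x3 x4 x5 rest
  norm_num at h0
  rw [h0]
  have hL : (fun (x : List Int) (y : Nat) => if (0:Int) ≤ (y : Int) + 1 then move_element x (5 * ((y : Int) + 1 + 1)) (5 * ((y : Int) + 1 + 1) - 1) else x)
      = fun (x : List Int) (y : Nat) => move_element x ((5 * y + 10 : Nat) : Int) (((5 * y + 10 : Nat) : Int) - 1) := by
    funext x y
    rw [if_pos (by positivity)]
    congr 1
  have hR : (fun (x : List Int) (y : Nat) => move_element x (5 * ((y : Int) + 1)) (5 * ((y : Int) + 1) - 1))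
      = fun (x : List Int) (y : Nat) => move_element x ((5 * y + 5 : Nat) : Int) (((5 * y + 5 : Nat) : Int) - 1) := by
    funext x y
    congr 1
  rw [hL, hR, show (x0 :: x1 :: x2 :: x3 :: x5 :: x4 :: rest : List Int) = [x0,x1,x2,x3,x5] ++ (x4 :: rest) from rfl,
     pv_shift c [x0,x1,x2,x3,x5] (x4 :: rest) rfl (by simp; omega)]
  simp

theorem pv_A_block (obs : List Int) : convertToOOSM obs = pvBlock obs := by
  match obs with
  | x0 :: x1 :: x2 :: x3 :: x4 :: x5 :: rest =>
    have ih := pv_A_block (x4 :: rest)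
    have hR : ((x0 :: x1 :: x2 :: x3 :: x4 :: x5 :: rest : List Int).length : Int) = (rest.length : Int) + 6 := by
      push_cast [List.length_cons]
      ring
    have hct1 : (((rest.length : Int) + 1 + 4) / 5).toNat ≥ 1 := by omega
    rw [pv_A_as_loop, if_pos (by rw [hR]; omega)]
    rw [show ((((x0 :: x1 :: x2 :: x3 :: x4 :: x5 :: rest : List Int).length : Int) + 4) / 5).toNat
        = ((((rest.length : Int) + 1 + 4) / 5).toNat - 1) + 2 by rw [hR]; omega]
    rw [pv_loop_step _ _ _ _ _ _ _ _ (by omega)]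
    rw [show ((((rest.length : Int) + 1 + 4) / 5).toNat - 1) + 1 = (((rest.length : Int) + 1 + 4) / 5).toNat by omega]
    rw [pvBlock]
    rw [pv_A_as_loop] at ih
    have hR2 : (((x4 :: rest : List Int).length : Nat) : Int) = (rest.length : Int) + 1 := by
      push_cast [List.length_cons]
      ring
    rw [if_pos (by rw [hR2]; omega), show ((((x4 :: rest : List Int).length : Int) + 4) / 5).toNat
        = (((rest.length : Int) + 1 + 4) / 5).toNat by rw [hR2]] at ih
    rw [← ih]
  | [] => rw [pv_small _ (by simp)]; simp [pvBlock]
  | [a0] => rw [pv_small _ (by simp)]; simp [pvBlock]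
  | [a0, a1] => rw [pv_small _ (by simp)]; simp [pvBlock]
  | [a0, a1, a2] => rw [pv_small _ (by simp)]; simp [pvBlock]
  | [a0, a1, a2, a3] => rw [pv_small _ (by simp)]; simp [pvBlock]
  | [a0, a1, a2, a3, a4] => rw [pv_small _ (by simp)]; simp [pvBlock]
termination_by obs.length
decreasing_by simp

-- B's comprehension, rewritten over `List.range` with the branch body abstracted as pvF
def pvF (obs : List Int) (i : Int) : Int :=
  if PySem.Int.mod i 5 = 4 ∧ i + 1 < (obs.length : Int) then PySem.List.pyGetD obs (i + 1) 0
  else if PySem.Int.mod i 5 = 0 ∧ i > 0 then PySem.List.pyGetD obs (i - 1) 0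
  else PySem.List.pyGetD obs i 0

lemma pv_mod5 (i : Int) : PySem.Int.mod i 5 = i % 5 := PySem.Int.mod_eq_emod_of_pos (by norm_num)

lemma pv_B_as_map (obs : List Int) :
    convertToOOSM_alt obs = (List.range obs.length).map (fun (k : Nat) => pvF obs (k : Int)) := by
  rw [convertToOOSM_alt]
  simp only [PySem.List.pyRange_zero, List.map_map]
  rw [Int.toNat_natCast]
  rfl

lemma pv_B_small (obs : List Int) (h : obs.length ≤ 5) : convertToOOSM_alt obs = obs := by
  rw [pv_B_as_map]
  have hcongr : ∀ (k : Nat), k ∈ List.range obs.length → pvF obs (k : Int) = PySem.List.pyGetD obs (k : Int) 0 := by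
    intro k hk
    rw [List.mem_range] at hk
    rw [pvF, pv_mod5]
    rw [if_neg (by omega), if_neg (by omega)]
  rw [List.map_congr_left hcongr]
  have h2 := PySem.List.map_pyGetD_pyRange_zero (xs := obs) (d := (0:Int))
  rw [PySem.List.pyRange_zero] at h2
  simpa [List.map_map, Function.comp_def, List.getD_eq_getElem?_getD, Int.toNat_natCast] using h2

lemma pv_getD1 (x : Int) (xs : List Int) (i : Int) (h : 1 ≤ i) :
    PySem.List.pyGetD (x :: xs) i 0 = PySem.List.pyGetD xs (i - 1) 0 := by
  obtain ⟨m, rfl⟩ : ∃ m : Nat, i = (m : Int) + 1 := ⟨(i - 1).toNat, by omega⟩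
  simp only [PySem.List.pyGetD, PySem.List.pyGet?_cons_succ, add_sub_cancel_right]

lemma pv_getD6 (x0 x1 x2 x3 x4 x5 : Int) (rest : List Int) (i : Int) (h : 6 ≤ i) :
    PySem.List.pyGetD (x0 :: x1 :: x2 :: x3 :: x4 :: x5 :: rest) i 0 = PySem.List.pyGetD rest (i - 6) 0 := by
  rw [pv_getD1 _ _ _ (by omega), pv_getD1 _ _ _ (by omega), pv_getD1 _ _ _ (by omega),
      pv_getD1 _ _ _ (by omega), pv_getD1 _ _ _ (by omega), pv_getD1 _ _ _ (by omega)]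
  congr 1
  ring

lemma pv_F_shift (x0 x1 x2 x3 x4 x5 : Int) (rest : List Int) (k : Nat) (hk : k < rest.length + 1) :
    pvF (x0 :: x1 :: x2 :: x3 :: x4 :: x5 :: rest) (((5 + k : Nat) : Int))
      = pvF (x4 :: rest) ((k : Nat) : Int) := by
  rw [pvF, pvF, pv_mod5, pv_mod5]
  simp only [List.length_cons]
  push_cast
  split_ifs with h1 h2 h3 h4 h5
  all_goals try (exfalso; omega)
  · -- both read the element one to the right
    rw [pv_getD6 _ _ _ _ _ _ _ _ (by omega), pv_getD1 _ _ _ (by omega)]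
    congr 1
    ring
  · -- both read the element one to the left
    rw [pv_getD6 _ _ _ _ _ _ _ _ (by omega), pv_getD1 _ _ _ (by omega)]
    congr 1
    ring
  · -- k = 0: position 5 of the whole list is position 0 of the recursive tail
    have hk0 : k = 0 := by omega
    subst hk0
    norm_num
    rw [PySem.List.pyGetD_ofNat' _ 4]
    rfl
  · -- plain position
    rw [pv_getD6 _ _ _ _ _ _ _ _ (by omega), pv_getD1 _ _ _ (by omega)]
    congr 1
    ring

lemma pv_B_step (x0 x1 x2 x3 x4 x5 : Int) (rest : List Int) :
    convertToOOSM_alt (x0 :: x1 :: x2 :: x3 :: x4 :: x5 :: rest)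
      = x0 :: x1 :: x2 :: x3 :: x5 :: convertToOOSM_alt (x4 :: rest) := by
  rw [pv_B_as_map, pv_B_as_map]
  simp only [List.length_cons]
  rw [show rest.length + 1 + 1 + 1 + 1 + 1 + 1 = 5 + (rest.length + 1) by omega, List.range_add,
      List.map_append, List.map_map]
  have hhead : (List.range 5).map (fun (k : Nat) => pvF (x0 :: x1 :: x2 :: x3 :: x4 :: x5 :: rest) (k : Int))
      = [x0, x1, x2, x3, x5] := by
    have hr5 : List.range 5 = [0, 1, 2, 3, 4] := rfl
    rw [hr5]
    simp only [List.map_cons, List.map_nil]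
    rw [pvF, pvF, pvF, pvF, pvF]
    simp only [pv_mod5, List.length_cons]
    norm_num
    refine ⟨?_, ?_, ?_, ?_⟩
    · rw [PySem.List.pyGetD_ofNat' _ 1]
      rfl
    · rw [PySem.List.pyGetD_ofNat' _ 2]
      rfl
    · rw [PySem.List.pyGetD_ofNat' _ 3]
      rfl
    · rw [if_pos (by omega), PySem.List.pyGetD_ofNat' _ 5]
      rfl
  have htail : (List.range (rest.length + 1)).map ((fun (k : Nat) => pvF (x0 :: x1 :: x2 :: x3 :: x4 :: x5 :: rest) (k : Int)) ∘ (fun k => 5 + k))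
      = (List.range (rest.length + 1)).map (fun (k : Nat) => pvF (x4 :: rest) (k : Int)) := by
    apply List.map_congr_left
    intro k hk
    rw [List.mem_range] at hk
    exact pv_F_shift x0 x1 x2 x3 x4 x5 rest k hk
  rw [hhead, htail]
  rfl

theorem pv_B_block (obs : List Int) : convertToOOSM_alt obs = pvBlock obs := by
  match obs with
  | x0 :: x1 :: x2 :: x3 :: x4 :: x5 :: rest =>
    have ih := pv_B_block (x4 :: rest)
    rw [pv_B_step, ih, pvBlock]
  | [] => rw [pv_B_small _ (by simp)]; simp [pvBlock]
  | [a0] => rw [pv_B_small _ (by simp)]; simp [pvBlock]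
  | [a0, a1] => rw [pv_B_small _ (by simp)]; simp [pvBlock]
  | [a0, a1, a2] => rw [pv_B_small _ (by simp)]; simp [pvBlock]
  | [a0, a1, a2, a3] => rw [pv_B_small _ (by simp)]; simp [pvBlock]
  | [a0, a1, a2, a3, a4] => rw [pv_B_small _ (by simp)]; simp [pvBlock]
termination_by obs.length
decreasing_by simp

-- ===== VERDICT (by name: the statement is the Claim_ definition above) =====
theorem convertToOOSM_spec : Claim_equal_convertToOOSM := by
  intro obs _
  unfold Spec_convertToOOSM
  rw [pv_A_block, pv_B_block]
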